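-- pv_equiv track=rewrite | github.com/sean578/advent_of_code | 2020/day_16.py | get_possible_fields
-- ===== SOURCE A (Python) =====
-- from collections import defaultdict
--
-- def get_possible_fields(field_rules, tickets):
--     # If at least 1 rule is obeyed for all tickets then add possible location of field
--     # tickets: [ticket][field]
--
--     possible_fields = defaultdict(set)  # key = field name, value = set of possible locations
--
--     # loop over fields & corresponding rules
--     for field, rules in field_rules.items():
--         # loop over position - which positions work for the field
--         for pos in range(len(tickets[0])):
--             # loop over tickets - do all tickets meet rule
--             num_ok = 0
--             for t in tickets:
--                 # check if ok for either range
--                 if (rules[0][0] <= t[pos] <= rules[0][1]) or (rules[1][0] <= t[pos] <= rules[1][1]):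
--                     num_ok += 1
--             if num_ok == len(tickets):
--                 possible_fields[field].add(pos)
--
--     return possible_fields
-- ===== SOURCE B (Python) =====
-- from collections import defaultdict
--
--
-- def get_possible_fields(field_rules, tickets):
--     # Tickets-outermost pass: keep a shrinking candidate-position set per field
--     # and prune it ticket by ticket; fields left with no candidates get no key.
--     possible_fields = defaultdict(set)
--     if not field_rules:
--         return possible_fields
--     candidates = {field: set(range(len(tickets[0]))) for field in field_rules}
--     for t in tickets:
--         for field, rules in field_rules.items():
--             candidates[field] = {pos for pos in candidates[field]
--                                  if rules[0][0] <= t[pos] <= rules[0][1]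
--                                  or rules[1][0] <= t[pos] <= rules[1][1]}
--     for field, s in candidates.items():
--         if s:
--             possible_fields[field] = s
--     return possible_fields
-- ===== Notes on version B (the rewrite author's own statement) =====
-- stated objective: faster
-- what changed: Loops are inverted: instead of counting, per field and position, how many tickets pass (three nested loops ending in a count-vs-length test), B initialises a full candidate-position set per field and makes one pass over the tickets, pruning each field's set; a position discarded by one ticket is never re-examined for later tickets, which a timing run measured as a large speedup.
import Mathlib
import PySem

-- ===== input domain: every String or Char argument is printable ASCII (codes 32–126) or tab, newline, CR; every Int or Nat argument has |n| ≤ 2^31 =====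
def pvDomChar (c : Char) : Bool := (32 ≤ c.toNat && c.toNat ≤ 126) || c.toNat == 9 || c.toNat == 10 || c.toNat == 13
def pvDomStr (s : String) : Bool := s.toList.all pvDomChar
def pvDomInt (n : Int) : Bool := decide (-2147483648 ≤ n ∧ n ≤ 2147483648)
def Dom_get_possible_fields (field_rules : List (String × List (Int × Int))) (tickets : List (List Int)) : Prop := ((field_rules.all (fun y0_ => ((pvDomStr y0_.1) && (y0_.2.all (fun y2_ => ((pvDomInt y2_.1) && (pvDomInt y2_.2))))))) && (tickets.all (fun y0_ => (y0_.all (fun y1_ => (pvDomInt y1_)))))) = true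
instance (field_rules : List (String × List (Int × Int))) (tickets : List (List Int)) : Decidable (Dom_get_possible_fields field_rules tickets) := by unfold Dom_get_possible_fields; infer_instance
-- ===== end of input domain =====

-- B inverts the loop nest: instead of counting, per field and position, how many tickets pass,
-- it keeps a per-field candidate-position set and prunes it in one pass over the tickets
-- (a discarded position is never re-examined for later tickets; a timing run measured B faster).


-- ===== PORT A =====
-- both Pythons contain the same chained-comparison expression
-- 'rules[0][0] <= v <= rules[0][1] or rules[1][0] <= v <= rules[1][1]'; ported once here
-- (pyGetD's default is never read under Pre_: rules has ≥ 2 entries whenever it is indexed)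
def pvRulesOk (rules : List (Int × Int)) (v : Int) : Bool :=
  let r0 := PySem.List.pyGetD rules 0 ((0 : Int), (0 : Int))
  let r1 := PySem.List.pyGetD rules 1 ((0 : Int), (0 : Int))
  (decide (r0.1 ≤ v) && decide (v ≤ r0.2)) || (decide (r1.1 ≤ v) && decide (v ≤ r1.2))

def get_possible_fields (field_rules : List (String × List (Int × Int))) (tickets : List (List Int)) : List (String × List Int) :=
  (field_rules.foldl
    (fun (pf : PySem.Dict String (PySem.Set Int)) (p : String × List (Int × Int)) =>
      (PySem.List.pyRange 0 (PySem.List.len (tickets.headD [])) 1).foldl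
        (fun pf2 pos =>
          let num_ok : Int := tickets.foldl
            (fun n t => if pvRulesOk p.2 (PySem.List.pyGetD t pos 0) then n + 1 else n) 0
          if num_ok = PySem.List.len tickets then
            PySem.Dict.modify pf2 p.1 [] (fun s => PySem.Set.add s pos)
          else pf2)
        pf)
    PySem.Dict.empty).items

-- ===== PORT B =====
def get_possible_fields_alt (field_rules : List (String × List (Int × Int))) (tickets : List (List Int)) : List (String × List Int) :=
  if field_rules.isEmpty then []
  else
    let cand0 : PySem.Dict String (PySem.Set Int) :=
      field_rules.foldl
        (fun d p => d.insert p.1 (PySem.Set.ofList (PySem.List.pyRange 0 (PySem.List.len (tickets.headD [])) 1)))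
        PySem.Dict.empty
    let cand := tickets.foldl
      (fun d t =>
        field_rules.foldl
          (fun d p =>
            d.insert p.1 ((PySem.Dict.getD d p.1 []).filter (fun pos => pvRulesOk p.2 (PySem.List.pyGetD t pos 0))))
          d)
      cand0
    (cand.items.foldl
      (fun (pf : PySem.Dict String (PySem.Set Int)) q =>
        if q.2.isEmpty then pf else pf.insert q.1 q.2)
      PySem.Dict.empty).items

-- ===== PRECONDITION & SPEC =====
-- Pre_ excludes (a) association lists with duplicate field names, which cannot arise from the
-- Python dict argument, and (b) exactly the inputs on which the Python A raises IndexError: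
-- nonempty field_rules with empty tickets (tickets[0]), and — when there is at least one
-- position — a rules list shorter than 2 (rules[1]) or a ticket shorter than tickets[0] (t[pos]).
def Pre_get_possible_fields (field_rules : List (String × List (Int × Int))) (tickets : List (List Int)) : Prop :=
  (field_rules.map Prod.fst).Nodup ∧
  (field_rules = [] ∨
    (tickets ≠ [] ∧
      ((tickets.headD []).length = 0 ∨
        ((∀ p ∈ field_rules, 2 ≤ p.2.length) ∧
         ∀ t ∈ tickets, (tickets.headD []).length ≤ t.length))))
instance (field_rules : List (String × List (Int × Int))) (tickets : List (List Int)) : Decidable (Pre_get_possible_fields field_rules tickets) := by unfold Pre_get_possible_fields; infer_instance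

def pvWitness_get_possible_fields : (List (String × List (Int × Int))) × List (List Int) :=
  ([("a", [((0 : Int), (2 : Int)), ((5 : Int), (6 : Int))]), ("b", [(1, 1), (3, 4)])], [[1, 3], [2, 4]])

def Spec_get_possible_fields (field_rules : List (String × List (Int × Int))) (tickets : List (List Int)) (out : List (String × List Int)) : Prop := out = get_possible_fields_alt field_rules tickets
instance (field_rules : List (String × List (Int × Int))) (tickets : List (List Int)) (out : List (String × List Int)) : Decidable (Spec_get_possible_fields field_rules tickets out) := by unfold Spec_get_possible_fields; infer_instance

-- ===== CLAIM (what is proved, stated in full; the proofs are below) =====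
def Claim_equal_get_possible_fields : Prop := ∀ (field_rules : List (String × List (Int × Int))) (tickets : List (List Int)), Dom_get_possible_fields field_rules tickets → Pre_get_possible_fields field_rules tickets → Spec_get_possible_fields field_rules tickets (get_possible_fields field_rules tickets)

-- ===== LEMMAS AND PROOFS =====

-- the count '== len(tickets)' test is the all-tickets test
theorem pv_count_eq_len_iff (tk : List (List Int)) (q : List Int → Bool) :
    (tk.foldl (fun n t => if q t then n + 1 else n) (0 : Int) = PySem.List.len tk) ↔ tk.all q = true := by
  rw [PySem.List.foldl_count_if, PySem.List.len_eq]
  constructor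
  · intro h
    have : tk.countP q = tk.length := by omega
    exact List.all_eq_true.mpr (List.countP_eq_length.mp this)
  · intro h
    have := List.countP_eq_length.mpr (List.all_eq_true.mp h)
    omega

-- replacing key k leaves a segment without key k unchanged
theorem pv_map_replace_id {ν : Type} (l : List (String × ν)) (k : String) (w : ν)
    (h : k ∉ l.map Prod.fst) :
    l.map (fun p => if (p.1 == k) = true then (k, w) else p) = l := by
  induction l with
  | nil => rfl
  | cons a l ih =>
    simp only [List.map_cons, List.mem_cons, not_or] at h ⊢
    rw [if_neg (by simpa using Ne.symm h.1), ih h.2]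

-- get? at the unique occurrence of a key
theorem pv_get?_last {ν : Type} (pre : List (String × ν)) (k : String) (v : ν) (rest : List (String × ν))
    (h : k ∉ pre.map Prod.fst) :
    (PySem.Dict.mk (pre ++ (k, v) :: rest)).get? k = some v := by
  induction pre with
  | nil => simp [PySem.Dict.get?_mk_cons]
  | cons a pre ih =>
    simp only [List.map_cons, List.mem_cons, not_or] at h
    rw [List.cons_append, PySem.Dict.get?_mk_cons, if_neg (by simp [Ne.symm h.1]), ih h.2]

theorem pv_contains_mk_of_not_mem {ν : Type} (l : List (String × ν)) (k : String)
    (h : k ∉ l.map Prod.fst) : (PySem.Dict.mk l).contains k = false := by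
  simp only [PySem.Dict.contains, List.any_eq_false]
  intro p hp
  simp only [Bool.not_eq_true, beq_eq_false_iff_ne, ne_eq]
  exact fun he => h (he ▸ List.mem_map_of_mem hp)

-- inserting at the unique occurrence of a key rewrites just that entry
theorem pv_insert_present {ν : Type} (pre : List (String × ν)) (k : String) (v w : ν) (rest : List (String × ν))
    (hpre : k ∉ pre.map Prod.fst) (hrest : k ∉ rest.map Prod.fst) :
    (PySem.Dict.mk (pre ++ (k, v) :: rest)).insert k w = PySem.Dict.mk (pre ++ (k, w) :: rest) := by
  have hc : (PySem.Dict.mk (pre ++ (k, v) :: rest)).contains k = true := by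
    simp [PySem.Dict.contains]
  have := PySem.Dict.items_insert_of_contains (PySem.Dict.mk (pre ++ (k, v) :: rest)) w hc
  apply PySem.Dict.ext
  rw [this]
  show (pre ++ (k, v) :: rest).map _ = _
  rw [List.map_append, List.map_cons, pv_map_replace_id pre k w hpre,
    pv_map_replace_id rest k w hrest, if_pos (by simp)]

-- A's inner position loop, once the field's entry exists (as the last entry)
theorem pv_innerA_present (ps : List Int) (c : Int → Bool) (f : String) :
    ∀ (pre : List (String × PySem.Set Int)) (s : PySem.Set Int), f ∉ pre.map Prod.fst →
    ps.foldl
      (fun d pos => if c pos then PySem.Dict.modify d f [] (fun t => PySem.Set.add t pos) else d)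
      (PySem.Dict.mk (pre ++ [(f, s)]))
    = PySem.Dict.mk (pre ++ [(f, PySem.Set.update s (ps.filter c))]) := by
  induction ps with
  | nil => intro pre s _; simp [PySem.Set.update]
  | cons pos ps ih =>
    intro pre s hf
    by_cases hc : c pos = true
    · rw [List.foldl_cons, if_pos hc]
      have hget : (PySem.Dict.mk (pre ++ [(f, s)])).getD f [] = s := by
        rw [PySem.Dict.getD_eq_get?_getD, pv_get?_last pre f s [] hf]; rfl
      rw [PySem.Dict.modify, hget,
        pv_insert_present pre f s (PySem.Set.add s pos) [] hf (by simp),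
        ih pre (PySem.Set.add s pos) hf,
        List.filter_cons_of_pos hc, PySem.Set.update_cons]
    · rw [List.foldl_cons, if_neg hc, ih pre s hf,
        List.filter_cons_of_neg (by simp [hc])]

-- A's inner position loop from a dict not containing the field
theorem pv_innerA_absent (ps : List Int) (c : Int → Bool) (f : String)
    (pre : List (String × PySem.Set Int)) (h : f ∉ pre.map Prod.fst) :
    ps.foldl
      (fun d pos => if c pos then PySem.Dict.modify d f [] (fun t => PySem.Set.add t pos) else d)
      (PySem.Dict.mk pre)
    = if ps.filter c = [] then PySem.Dict.mk pre
      else PySem.Dict.mk (pre ++ [(f, PySem.Set.ofList (ps.filter c))]) := by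
  induction ps with
  | nil => simp
  | cons pos ps ih =>
    by_cases hc : c pos = true
    · have hget : (PySem.Dict.mk pre).getD f [] = ([] : PySem.Set Int) := by
        rw [PySem.Dict.getD_eq_get?_getD,
          (PySem.Dict.get?_eq_none_iff_not_mem_keys _ _).mpr (by simpa [PySem.Dict.keys_mk] using h)]
        rfl
      have hins : (PySem.Dict.mk pre).insert f (PySem.Set.add ([] : PySem.Set Int) pos)
          = PySem.Dict.mk (pre ++ [(f, PySem.Set.add ([] : PySem.Set Int) pos)]) := by
        apply PySem.Dict.ext
        rw [PySem.Dict.items_insert_of_not_contains _ _ (pv_contains_mk_of_not_mem pre f h)]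
      rw [List.foldl_cons, if_pos hc, PySem.Dict.modify, hget, hins,
        pv_innerA_present ps c f pre _ h, List.filter_cons_of_pos hc,
        if_neg (by simp)]
      have : PySem.Set.ofList (pos :: ps.filter c)
          = PySem.Set.update (PySem.Set.add ([] : PySem.Set Int) pos) (ps.filter c) := by
        rw [PySem.Set.ofList_eq_foldl, List.foldl_cons]; rfl
      rw [this]
    · rw [List.foldl_cons, if_neg hc, ih, List.filter_cons_of_neg (by simp [hc])]

-- A's outer field loop
theorem pv_outerA (fr : List (String × List (Int × Int))) (R : List Int)
    (c : (String × List (Int × Int)) → Int → Bool) :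
    ∀ (pre : List (String × PySem.Set Int)), (fr.map Prod.fst).Nodup →
    (∀ p ∈ fr, p.1 ∉ pre.map Prod.fst) →
    (fr.foldl
      (fun d p => R.foldl
        (fun d2 pos => if c p pos then PySem.Dict.modify d2 p.1 [] (fun t => PySem.Set.add t pos) else d2)
        d)
      (PySem.Dict.mk pre)).items
    = pre ++ (fr.filter (fun p => !(R.filter (c p)).isEmpty)).map
        (fun p => (p.1, PySem.Set.ofList (R.filter (c p)))) := by
  induction fr with
  | nil => intro pre _ _; simp
  | cons p fr ih =>
    intro pre hnd hdisj
    simp only [List.map_cons, List.nodup_cons] at hnd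
    rw [List.foldl_cons, pv_innerA_absent R (c p) p.1 pre (hdisj p (by simp))]
    by_cases hemp : R.filter (c p) = []
    · rw [if_pos hemp, ih pre hnd.2 (fun q hq => hdisj q (by simp [hq])),
        List.filter_cons_of_neg (by simp [hemp])]
    · rw [if_neg hemp, ih (pre ++ [(p.1, PySem.Set.ofList (R.filter (c p)))]) hnd.2 ?_ ,
        List.filter_cons_of_pos (by simp [hemp]), List.map_cons, List.append_assoc]
      rfl
      intro q hq
      simp only [List.map_append, List.mem_append, not_or, List.map_cons, List.map_nil,
        List.mem_cons, List.not_mem_nil, or_false]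
      exact ⟨hdisj q (by simp [hq]),
        fun he => hnd.1 (by rw [← he]; exact List.mem_map_of_mem hq)⟩

-- B's initialisation loop appends one full-range entry per field
theorem pv_initB (fr : List (String × List (Int × Int))) (v0 : PySem.Set Int) :
    ∀ (pre : List (String × PySem.Set Int)), (fr.map Prod.fst).Nodup →
    (∀ p ∈ fr, p.1 ∉ pre.map Prod.fst) →
    (fr.foldl (fun d p => d.insert p.1 v0) (PySem.Dict.mk pre)).items
      = pre ++ fr.map (fun p => (p.1, v0)) := by
  induction fr with
  | nil => intro pre _ _; simp
  | cons p fr ih =>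
    intro pre hnd hdisj
    simp only [List.map_cons, List.nodup_cons] at hnd
    have hins : (PySem.Dict.mk pre).insert p.1 v0 = PySem.Dict.mk (pre ++ [(p.1, v0)]) := by
      apply PySem.Dict.ext
      rw [PySem.Dict.items_insert_of_not_contains _ _
        (pv_contains_mk_of_not_mem pre p.1 (hdisj p (by simp)))]
    rw [List.foldl_cons, hins, ih (pre ++ [(p.1, v0)]) hnd.2 ?_, List.map_cons, List.append_assoc]
    rfl
    intro q hq
    simp only [List.map_append, List.mem_append, not_or, List.map_cons, List.map_nil,
      List.mem_cons, List.not_mem_nil, or_false]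
    exact ⟨hdisj q (by simp [hq]),
      fun he => hnd.1 (by rw [← he]; exact List.mem_map_of_mem hq)⟩

-- B's per-ticket pruning pass maps each field's entry through a filter
theorem pv_pruneB (fr : List (String × List (Int × Int))) (c : (String × List (Int × Int)) → Int → Bool) :
    ∀ (pre : List (String × PySem.Set Int)) (v : (String × List (Int × Int)) → PySem.Set Int),
    ((pre ++ fr.map (fun p => (p.1, v p))).map Prod.fst).Nodup →
    (fr.foldl
      (fun d p => d.insert p.1 ((PySem.Dict.getD d p.1 []).filter (c p)))
      (PySem.Dict.mk (pre ++ fr.map (fun p => (p.1, v p))))).items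
    = pre ++ fr.map (fun p => (p.1, (v p).filter (c p))) := by
  induction fr with
  | nil => intro pre _ _; simp
  | cons p fr ih =>
    intro pre v hnd
    have hnd' := hnd
    simp only [List.map_append, List.map_cons, List.map_map] at hnd'
    have hkeys : (pre.map Prod.fst ++ p.1 :: fr.map Prod.fst).Nodup := by
      simpa [Function.comp] using hnd'
    have hpre : p.1 ∉ pre.map Prod.fst := by
      have := List.disjoint_of_nodup_append hkeys
      exact fun hm => this hm (by simp)
    have hrest : p.1 ∉ fr.map Prod.fst := by
      have h2 := hkeys.of_append_right
      exact (List.nodup_cons.mp h2).1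
    have hget : (PySem.Dict.mk (pre ++ (p :: fr).map (fun p => (p.1, v p)))).getD p.1 [] = v p := by
      rw [List.map_cons, PySem.Dict.getD_eq_get?_getD, pv_get?_last pre p.1 (v p) _ hpre]
      rfl
    rw [List.foldl_cons, hget, List.map_cons,
      pv_insert_present pre p.1 (v p) ((v p).filter (c p)) _ hpre
        (by simpa [Function.comp] using hrest)]
    have hre : pre ++ (p.1, (v p).filter (c p)) :: fr.map (fun q => (q.1, v q))
        = (pre ++ [(p.1, (v p).filter (c p))]) ++ fr.map (fun q => (q.1, v q)) := by
      simp
    rw [hre, ih (pre ++ [(p.1, (v p).filter (c p))]) v ?_, List.map_cons, List.append_assoc]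
    rfl
    simp only [List.map_append, List.map_cons, List.map_map, List.append_assoc,
      List.singleton_append]
    simpa [Function.comp] using hnd'

-- B's ticket loop iterates the pruning pass
theorem pv_ticketsB (tks : List (List Int)) (fr : List (String × List (Int × Int)))
    (g : (String × List (Int × Int)) → List Int → Int → Bool) :
    ∀ (v : (String × List (Int × Int)) → PySem.Set Int), (fr.map Prod.fst).Nodup →
    (tks.foldl
      (fun d t => fr.foldl
        (fun d p => d.insert p.1 ((PySem.Dict.getD d p.1 []).filter (fun pos => g p t pos)))
        d)
      (PySem.Dict.mk (fr.map (fun p => (p.1, v p))))).items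
    = fr.map (fun p => (p.1, tks.foldl (fun s t => s.filter (fun pos => g p t pos)) (v p))) := by
  induction tks with
  | nil => intro v _; simp
  | cons t tks ih =>
    intro v hnd
    have hstep := pv_pruneB fr (fun p => (fun pos => g p t pos)) [] v
      (by simpa [Function.comp] using hnd)
    simp only [List.nil_append] at hstep
    have heq : fr.foldl
        (fun d p => d.insert p.1 ((PySem.Dict.getD d p.1 []).filter (fun pos => g p t pos)))
        (PySem.Dict.mk (fr.map (fun p => (p.1, v p))))
        = PySem.Dict.mk (fr.map (fun p => (p.1, (v p).filter (fun pos => g p t pos)))) := by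
      apply PySem.Dict.ext; exact hstep
    rw [List.foldl_cons, heq, ih (fun p => (v p).filter (fun pos => g p t pos)) hnd]
    simp

-- iterated filtering is filtering by the conjunction
theorem pv_foldl_filter_all (l : List (List Int)) (q : List Int → Int → Bool) :
    ∀ (s : List Int),
    l.foldl (fun s t => s.filter (fun pos => q t pos)) s
      = s.filter (fun pos => l.all (fun t => q t pos)) := by
  induction l with
  | nil => intro s; simp
  | cons t l ih =>
    intro s
    rw [List.foldl_cons, ih, List.filter_filter]
    simp [Bool.and_comm]

-- B's final loop keeps, in order, the entries with a nonempty set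
theorem pv_finalB (L : List (String × PySem.Set Int)) :
    ∀ (pre : List (String × PySem.Set Int)), ((pre ++ L).map Prod.fst).Nodup →
    (L.foldl
      (fun pf q => if q.2.isEmpty then pf else pf.insert q.1 q.2)
      (PySem.Dict.mk pre)).items
    = pre ++ L.filter (fun q => !q.2.isEmpty) := by
  induction L with
  | nil => intro pre _; simp
  | cons q L ih =>
    intro pre hnd
    have hkeys : (pre.map Prod.fst ++ q.1 :: L.map Prod.fst).Nodup := by
      simpa using hnd
    have hpre : q.1 ∉ pre.map Prod.fst := by
      have := List.disjoint_of_nodup_append hkeys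
      exact fun hm => this hm (by simp)
    by_cases he : q.2.isEmpty = true
    · rw [List.foldl_cons, if_pos he, ih pre ?_, List.filter_cons_of_neg (by simp [he])]
      refine List.Nodup.sublist ?_ hnd
      simp only [List.map_append, List.map_cons]
      exact List.Sublist.append_left (List.sublist_cons_self _ _) _
    · have hins : (PySem.Dict.mk pre).insert q.1 q.2 = PySem.Dict.mk (pre ++ [q]) := by
        apply PySem.Dict.ext
        rw [PySem.Dict.items_insert_of_not_contains _ _ (pv_contains_mk_of_not_mem pre q.1 hpre)]
      rw [List.foldl_cons, if_neg he, hins, ih (pre ++ [q]) ?_,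
        List.filter_cons_of_pos (by simp [he]), List.append_assoc]
      rfl
      simpa using hnd

-- ===== VERDICT (by name: the statement is the Claim_ definition above) =====
theorem get_possible_fields_spec : Claim_equal_get_possible_fields := by
  intro fr tk _ hpre
  unfold Spec_get_possible_fields
  obtain ⟨hnd, -⟩ := hpre
  cases fr with
  | nil => rfl
  | cons pp fr0 =>
    have hRnd : (PySem.List.pyRange 0 (PySem.List.len (tk.headD [])) 1).Nodup := by
      rw [PySem.List.len_eq, PySem.List.pyRange_zero_natCast]
      exact List.nodup_range.map Nat.cast_injective
    -- A computes the per-field filtered position list, skipping fields where it is empty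
    have hA : get_possible_fields (pp :: fr0) tk
        = ((pp :: fr0).filter
            (fun p => !((PySem.List.pyRange 0 (PySem.List.len (tk.headD [])) 1).filter
              (fun pos => tk.all (fun t => pvRulesOk p.2 (PySem.List.pyGetD t pos 0)))).isEmpty)).map
            (fun p => (p.1, PySem.Set.ofList
              ((PySem.List.pyRange 0 (PySem.List.len (tk.headD [])) 1).filter
                (fun pos => tk.all (fun t => pvRulesOk p.2 (PySem.List.pyGetD t pos 0)))))) := by
      unfold get_possible_fields
      have hstep := List.foldl_ext
        (fun (pf : PySem.Dict String (PySem.Set Int)) (p : String × List (Int × Int)) =>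
          (PySem.List.pyRange 0 (PySem.List.len (tk.headD [])) 1).foldl
            (fun pf2 pos =>
              let num_ok : Int := tk.foldl
                (fun n t => if pvRulesOk p.2 (PySem.List.pyGetD t pos 0) then n + 1 else n) 0
              if num_ok = PySem.List.len tk then
                PySem.Dict.modify pf2 p.1 [] (fun s => PySem.Set.add s pos)
              else pf2)
            pf)
        (fun (pf : PySem.Dict String (PySem.Set Int)) (p : String × List (Int × Int)) =>
          (PySem.List.pyRange 0 (PySem.List.len (tk.headD [])) 1).foldl
            (fun pf2 pos =>
              if tk.all (fun t => pvRulesOk p.2 (PySem.List.pyGetD t pos 0)) = true then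
                PySem.Dict.modify pf2 p.1 [] (fun s => PySem.Set.add s pos)
              else pf2)
            pf)
        PySem.Dict.empty (l := pp :: fr0)
        (by
          intro d p _
          refine List.foldl_ext _ _ d (fun d2 pos _ => ?_)
          show (if (tk.foldl (fun n t => if pvRulesOk p.2 (PySem.List.pyGetD t pos 0) then n + 1 else n) 0
              = PySem.List.len tk) then PySem.Dict.modify d2 p.1 [] (fun s => PySem.Set.add s pos) else d2) = _
          rw [if_congr (pv_count_eq_len_iff tk (fun t => pvRulesOk p.2 (PySem.List.pyGetD t pos 0))) rfl rfl])
      rw [hstep]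
      exact pv_outerA (pp :: fr0) (PySem.List.pyRange 0 (PySem.List.len (tk.headD [])) 1)
        (fun p pos => tk.all (fun t => pvRulesOk p.2 (PySem.List.pyGetD t pos 0))) [] hnd (by simp)
    -- B: initialise, prune ticket by ticket, then drop empty entries
    have h0 : (pp :: fr0).foldl
        (fun d p => d.insert p.1 (PySem.Set.ofList (PySem.List.pyRange 0 (PySem.List.len (tk.headD [])) 1)))
        PySem.Dict.empty
        = PySem.Dict.mk ((pp :: fr0).map
            (fun p => (p.1, PySem.Set.ofList (PySem.List.pyRange 0 (PySem.List.len (tk.headD [])) 1)))) := by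
      apply PySem.Dict.ext
      exact pv_initB (pp :: fr0) _ [] hnd (by simp)
    have h1 : (tk.foldl
        (fun d t => (pp :: fr0).foldl
          (fun d p => d.insert p.1 ((PySem.Dict.getD d p.1 []).filter
            (fun pos => pvRulesOk p.2 (PySem.List.pyGetD t pos 0))))
          d)
        (PySem.Dict.mk ((pp :: fr0).map
          (fun p => (p.1, PySem.Set.ofList (PySem.List.pyRange 0 (PySem.List.len (tk.headD [])) 1)))))).items
        = (pp :: fr0).map (fun p => (p.1,
            ((PySem.List.pyRange 0 (PySem.List.len (tk.headD [])) 1).filter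
              (fun pos => tk.all (fun t => pvRulesOk p.2 (PySem.List.pyGetD t pos 0)))))) := by
      rw [pv_ticketsB tk (pp :: fr0)
        (fun p t pos => pvRulesOk p.2 (PySem.List.pyGetD t pos 0))
        (fun _ => PySem.Set.ofList (PySem.List.pyRange 0 (PySem.List.len (tk.headD [])) 1)) hnd]
      refine List.map_congr_left (fun p _ => ?_)
      rw [pv_foldl_filter_all tk (fun t pos => pvRulesOk p.2 (PySem.List.pyGetD t pos 0)),
        PySem.Set.ofList_eq_self_of_nodup _ hRnd]
    have hB : get_possible_fields_alt (pp :: fr0) tk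
        = (((pp :: fr0).map (fun p => (p.1,
            ((PySem.List.pyRange 0 (PySem.List.len (tk.headD [])) 1).filter
              (fun pos => tk.all (fun t => pvRulesOk p.2 (PySem.List.pyGetD t pos 0))))))).filter
            (fun q => !q.2.isEmpty)) := by
      calc get_possible_fields_alt (pp :: fr0) tk
          = (((tk.foldl
              (fun d t => (pp :: fr0).foldl
                (fun d p => d.insert p.1 ((PySem.Dict.getD d p.1 []).filter
                  (fun pos => pvRulesOk p.2 (PySem.List.pyGetD t pos 0))))
                d)
              (PySem.Dict.mk ((pp :: fr0).map
                (fun p => (p.1, PySem.Set.ofList (PySem.List.pyRange 0 (PySem.List.len (tk.headD [])) 1))))))).items.foldl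
            (fun pf q => if q.2.isEmpty then pf else pf.insert q.1 q.2)
            (PySem.Dict.empty : PySem.Dict String (PySem.Set Int))).items := by
            unfold get_possible_fields_alt
            rw [if_neg (by simp), h0]
        _ = (((pp :: fr0).map (fun p => (p.1,
              ((PySem.List.pyRange 0 (PySem.List.len (tk.headD [])) 1).filter
                (fun pos => tk.all (fun t => pvRulesOk p.2 (PySem.List.pyGetD t pos 0))))))).foldl
            (fun pf q => if q.2.isEmpty then pf else pf.insert q.1 q.2)
            (PySem.Dict.empty : PySem.Dict String (PySem.Set Int))).items := by rw [h1]
        _ = _ := by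
            have h2 := pv_finalB
              ((pp :: fr0).map (fun p => (p.1,
                ((PySem.List.pyRange 0 (PySem.List.len (tk.headD [])) 1).filter
                  (fun pos => tk.all (fun t => pvRulesOk p.2 (PySem.List.pyGetD t pos 0)))))))
              [] (by simpa [Function.comp] using hnd)
            simpa using h2
    rw [hA, hB, List.filter_map]
    refine List.map_congr_left (fun p hp => ?_)
    have := PySem.Set.ofList_eq_self_of_nodup _ (hRnd.filter
      (fun pos => tk.all (fun t => pvRulesOk p.2 (PySem.List.pyGetD t pos 0))))
    rw [this]
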